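-- pv_equiv track=rewrite | github.com/MrBrantCode/unitest_baseline | mut_generate/mist_train_cf/cf_78796/solution.py | find_none
-- ===== SOURCE A (Python) =====
-- def find_none(input_tuple):
--     none_count = 0
--     none_index = None
--     for idx, value in enumerate(input_tuple):
--         if value is None:
--             none_count += 1
--             if none_index is None:
--                 none_index = idx
--     if none_count == 0:
--         return "No None values found"
--     else:
--         return none_index, none_count
-- ===== SOURCE B (Python) =====
-- def find_none(input_tuple):
--     none_count = sum(1 for v in input_tuple if v is None)
--     if none_count == 0:
--         return "No None values found"
--     none_index = next(i for i, v in enumerate(input_tuple) if v is None)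
--     return none_index, none_count
-- ===== Notes on version B (the rewrite author's own statement) =====
-- stated objective: simpler
-- what changed: Replaces A's single fused loop carrying two pieces of state (count + first index with a None-sentinel check) by two separate one-liners: a generator-sum for the count and a next(enumerate) search for the first index, run only when needed.
-- outside the precondition, e.g. on find_none((1, 2)): A returns 'No None values found', B returns 'No None values found'
import Mathlib
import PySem

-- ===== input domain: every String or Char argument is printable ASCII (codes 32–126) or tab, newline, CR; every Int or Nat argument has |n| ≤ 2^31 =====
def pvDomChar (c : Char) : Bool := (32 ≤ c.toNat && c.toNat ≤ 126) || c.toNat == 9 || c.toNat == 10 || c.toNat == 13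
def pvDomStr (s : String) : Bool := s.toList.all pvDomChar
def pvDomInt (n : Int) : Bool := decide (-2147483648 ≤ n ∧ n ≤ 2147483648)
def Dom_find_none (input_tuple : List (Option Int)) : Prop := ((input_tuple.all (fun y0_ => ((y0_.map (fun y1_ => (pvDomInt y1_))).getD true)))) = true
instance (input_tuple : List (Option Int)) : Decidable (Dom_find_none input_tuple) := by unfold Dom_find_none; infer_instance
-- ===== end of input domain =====

-- B replaces A's single fused loop (two pieces of state) by two separate passes: a count fold, then a first-index search; objective: simpler.


-- ===== PORT A =====
-- A's loop body: count += 1 on None, remember first None index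
def findNoneStep (s : Int × Option Int) (p : Int × Option Int) : Int × Option Int :=
  if p.2 = none then
    (s.1 + 1, match s.2 with | none => some p.1 | some i => some i)
  else s

def find_none (input_tuple : List (Option Int)) : Int × Int :=
  let st := (PySem.List.enumerate input_tuple).foldl findNoneStep (0, none)
  match st.2 with
  | some i => (i, st.1)
  | none => (0, 0)   -- Python returns the string "No None values found" here; excluded by Pre_

-- ===== PORT B =====
def find_none_alt (input_tuple : List (Option Int)) : Int × Int :=
  let none_count : Int := input_tuple.foldl (fun acc v => if v = none then acc + 1 else acc) 0
  if none_count = 0 then (0, 0)   -- Python returns the string "No None values found" here; excluded by Pre_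
  else (((input_tuple.findIdx (fun v => v = none) : Nat) : Int), none_count)

-- ===== PRECONDITION & SPEC =====
-- Pre_ excludes inputs containing no None: there both Pythons return the string
-- "No None values found", which is not a value of the declared return type Int × Int.
def Pre_find_none (input_tuple : List (Option Int)) : Prop := none ∈ input_tuple
instance (input_tuple : List (Option Int)) : Decidable (Pre_find_none input_tuple) := by unfold Pre_find_none; infer_instance
def pvWitness_find_none : List (Option Int) := [some 1, none, some 2]

def Spec_find_none (input_tuple : List (Option Int)) (out : Int × Int) : Prop := out = find_none_alt input_tuple
instance (input_tuple : List (Option Int)) (out : Int × Int) : Decidable (Spec_find_none input_tuple out) := by unfold Spec_find_none; infer_instance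

-- ===== CLAIM (what is proved, stated in full; the proofs are below) =====
def Claim_equal_find_none : Prop := ∀ (input_tuple : List (Option Int)), Dom_find_none input_tuple → Pre_find_none input_tuple → Spec_find_none input_tuple (find_none input_tuple)

-- ===== LEMMAS AND PROOFS =====

-- count of Nones, as an Int
def cntNone (l : List (Option Int)) : Int := ((l.countP (fun v => v == none) : Nat) : Int)

theorem cntNone_cons (v : Option Int) (l : List (Option Int)) :
    cntNone (v :: l) = (if v = none then cntNone l + 1 else cntNone l) := by
  simp [cntNone, List.countP_cons]
  split_ifs with h <;> simp

theorem foldB_eq (l : List (Option Int)) : ∀ c : Int,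
    l.foldl (fun acc v => if v = none then acc + 1 else acc) c = c + cntNone l := by
  induction l with
  | nil => intro c; simp [cntNone]
  | cons v t ih =>
    intro c
    simp only [List.foldl_cons, cntNone_cons]
    rw [ih]
    split_ifs <;> ring

theorem foldA_some (l : List (Option Int)) : ∀ (s : Int) (c j : Int),
    (PySem.List.enumerate l s).foldl findNoneStep (c, some j) = (c + cntNone l, some j) := by
  induction l with
  | nil => intro s c j; simp [PySem.List.enumerate_nil, cntNone]
  | cons v t ih =>
    intro s c j
    rw [PySem.List.enumerate_cons]
    simp only [List.foldl_cons, findNoneStep, cntNone_cons]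
    split_ifs with h <;> (simp [ih]; try ring_nf)

theorem foldA_none (l : List (Option Int)) : ∀ (s : Int) (c : Int),
    (PySem.List.enumerate l s).foldl findNoneStep (c, none) =
      (c + cntNone l, (l.findIdx? (fun v => v = none)).map (fun k => s + (k : Int))) := by
  induction l with
  | nil => intro s c; simp [PySem.List.enumerate_nil, cntNone]
  | cons v t ih =>
    intro s c
    rw [PySem.List.enumerate_cons]
    simp only [List.foldl_cons, findNoneStep]
    by_cases h : v = none
    · subst h
      rw [if_pos rfl, foldA_some, cntNone_cons]
      simp [List.findIdx?_cons]
      ring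
    · simp only [if_neg h]
      rw [ih, cntNone_cons]
      simp only [if_neg h, List.findIdx?_cons]
      have hd : (decide (v = none)) = false := by simp [h]
      simp only [hd, Bool.false_eq_true, if_false]
      cases hft : List.findIdx? (fun v => decide (v = none)) t <;> simp [hft] <;> push_cast <;> ring

theorem find_none_spec : Claim_equal_find_none := by
  intro l _ hpre
  unfold Spec_find_none find_none find_none_alt
  have hmem : none ∈ l := hpre
  have hfind : l.findIdx? (fun v => v = none) = some (l.findIdx (fun v => v = none)) := by
    rw [List.findIdx?_eq_some_iff_findIdx_eq]
    constructor
    · exact List.findIdx_lt_length_of_exists ⟨none, hmem, by simp⟩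
    · rfl
  have hcnt : cntNone l ≠ 0 := by
    have : 0 < l.countP (fun v => v == none) := by
      rw [List.countP_pos_iff]; exact ⟨none, hmem, by simp⟩
    simp [cntNone]; omega
  simp only [foldA_none, hfind, foldB_eq]
  simp [hcnt]
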